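-- pv_equiv track=rewrite | github.com/ginneapig/SCAN-Lab-BL2 | list_directory2.py | alphabet_sort
-- ===== SOURCE A (Python) =====
-- def alphabet_sort(root_name, counts_dict):
--     '''Sorts dictionary of file and directory names alphabetically.
--     Calls counts_file() to create the CSV.
--     PARAM: string name of root to pass to counts_file(), dictionary of counts.
--     RETURN: none'''
--     dirs = {}
--     files = {}
--     for name in counts_dict:
--         if (name[-1] == '/'):
--             dirs[name] = counts_dict[name] # still string keyed to lists
--         else:
--             files[name] = counts_dict[name]
--
--     # separate dictionaries, sorted
--     sorted_dirs = {k:v for k,v in sorted(dirs.items(), key=lambda item:item[0])}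
--     sorted_files = {k:v for k,v in sorted(files.items(), key=lambda item:item[0])}
--
--     sorted_dirs.update(sorted_files)    # combine separate dictionaries again
--     return sorted_dirs
-- ===== SOURCE B (Python) =====
-- def alphabet_sort(root_name, counts_dict):
--     '''Single sort with a composite string key: a '0' prefix for directory
--     names (ending in '/') and '1' for files puts directories first, then
--     alphabetical order within each group; one pass rebuilds the dict.'''
--     ordered = sorted(counts_dict.items(),
--                      key=lambda item: ('0' if item[0][-1] == '/' else '1') + item[0])
--     return dict(ordered)
-- ===== Notes on version B (the rewrite author's own statement) =====
-- stated objective: idiomatic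
-- what changed: A partitions the dict into two dicts, sorts each by key and merges them with update; B performs a single stable sort of all items with a composite string key ('0'/'1' prefix for directory/file) and rebuilds the dict in one pass.
-- outside the precondition, e.g. on alphabet_sort('x', {'': [1]}): A raises IndexError, B raises IndexError
import Mathlib
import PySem

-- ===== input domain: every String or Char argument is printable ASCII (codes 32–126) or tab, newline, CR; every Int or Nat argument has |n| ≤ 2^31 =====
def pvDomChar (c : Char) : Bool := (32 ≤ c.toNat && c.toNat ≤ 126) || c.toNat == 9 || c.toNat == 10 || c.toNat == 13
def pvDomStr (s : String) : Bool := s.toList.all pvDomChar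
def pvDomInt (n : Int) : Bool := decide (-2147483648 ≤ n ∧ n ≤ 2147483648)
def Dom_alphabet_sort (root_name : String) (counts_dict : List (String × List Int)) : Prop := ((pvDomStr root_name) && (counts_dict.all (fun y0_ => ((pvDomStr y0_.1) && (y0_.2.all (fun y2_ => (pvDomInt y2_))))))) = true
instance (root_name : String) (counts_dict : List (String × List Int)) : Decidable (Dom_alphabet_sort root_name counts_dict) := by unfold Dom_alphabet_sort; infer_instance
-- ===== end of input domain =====

-- B replaces A's partition-into-two-dicts + two sorts + merge by ONE sort with a
-- composite string key ('0'/'1' prefix for dir/file) and a single dict rebuild (objective: idiomatic).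


-- ===== PORT A =====
-- one loop partitioning the dict into dirs/files, a sort of each, then dict-update merge
def alphabet_sort (root_name : String) (counts_dict : List (String × List Int)) : List (String × List Int) :=
  let st := counts_dict.foldl
    (fun (st : PySem.Dict String (List Int) × PySem.Dict String (List Int)) kv =>
      if PySem.Str.pyGet? kv.1 (-1) == some '/' then
        (st.1.insert kv.1 ((PySem.Dict.mk counts_dict).getD kv.1 []), st.2)
      else
        (st.1, st.2.insert kv.1 ((PySem.Dict.mk counts_dict).getD kv.1 [])))
    (PySem.Dict.empty, PySem.Dict.empty)
  let sorted_dirs := PySem.Dict.ofList (PySem.List.sorted st.1.items (fun item => item.1) false)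
  let sorted_files := PySem.Dict.ofList (PySem.List.sorted st.2.items (fun item => item.1) false)
  (PySem.Dict.update sorted_dirs sorted_files.items).items

-- ===== PORT B =====
-- one stable sort by composite string key, then one dict-comprehension pass
def alphabet_sort_alt (root_name : String) (counts_dict : List (String × List Int)) : List (String × List Int) :=
  let ordered := PySem.List.sorted counts_dict
    (fun item => (if PySem.Str.pyGet? item.1 (-1) == some '/' then "0" else "1") ++ item.1) false
  (PySem.Dict.ofList ordered).items

-- ===== PRECONDITION & SPEC =====
-- Pre_ excludes dicts holding the empty-string key, on which A raises IndexError (name[-1]),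
-- and association lists with duplicate keys, which a Python dict cannot represent.
def Pre_alphabet_sort (root_name : String) (counts_dict : List (String × List Int)) : Prop :=
  (∀ p ∈ counts_dict, p.1 ≠ "") ∧ (counts_dict.map Prod.fst).Nodup
instance (root_name : String) (counts_dict : List (String × List Int)) : Decidable (Pre_alphabet_sort root_name counts_dict) := by unfold Pre_alphabet_sort; infer_instance
def pvWitness_alphabet_sort : String × (List (String × List Int)) := ("root", [("b.txt", [1, 2]), ("a/", [3]), ("c/", [])])

def Spec_alphabet_sort (root_name : String) (counts_dict : List (String × List Int)) (out : List (String × List Int)) : Prop := out = alphabet_sort_alt root_name counts_dict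
instance (root_name : String) (counts_dict : List (String × List Int)) (out : List (String × List Int)) : Decidable (Spec_alphabet_sort root_name counts_dict out) := by unfold Spec_alphabet_sort; infer_instance

-- ===== CLAIM (what is proved, stated in full; the proofs are below) =====
def Claim_equal_alphabet_sort : Prop := ∀ (root_name : String) (counts_dict : List (String × List Int)), Dom_alphabet_sort root_name counts_dict → Pre_alphabet_sort root_name counts_dict → Spec_alphabet_sort root_name counts_dict (alphabet_sort root_name counts_dict)

-- ===== LEMMAS AND PROOFS =====

-- the dir/file test of both programs (depends only on the key)
def pvP (kv : String × List Int) : Bool := PySem.Str.pyGet? kv.1 (-1) == some '/'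

-- B's composite sort key
def pvBigkey (kv : String × List Int) : String :=
  (if PySem.Str.pyGet? kv.1 (-1) == some '/' then "0" else "1") ++ kv.1

theorem pvP_eq_of_fst (a b : String × List Int) (h : a.1 = b.1) : pvP a = pvP b := by
  simp [pvP, h]

-- building a dict by repeated insert of fresh, pairwise-distinct keys just appends the pairs
theorem pv_foldl_insert_items {ν : Type} (l : List (String × ν)) (d : PySem.Dict String ν)
    (hnd : (l.map Prod.fst).Nodup) (hfresh : ∀ p ∈ l, d.contains p.1 = false) :
    (l.foldl (fun acc p => acc.insert p.1 p.2) d).items = d.items ++ l := by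
  induction l generalizing d with
  | nil => simp
  | cons x xs ih =>
    simp only [List.foldl_cons]
    have hx : d.contains x.1 = false := hfresh x (by simp)
    rw [ih (d.insert x.1 x.2) (by simpa using hnd.of_cons)]
    · rw [PySem.Dict.items_insert_of_not_contains d x.2 hx]
      simp
    · intro p hp
      have hne : p.1 ≠ x.1 := by
        simp only [List.map_cons, List.nodup_cons] at hnd
        intro h
        exact hnd.1 (h ▸ List.mem_map_of_mem hp)
      rw [PySem.Dict.contains_insert]
      simp [hne, hfresh p (List.mem_cons_of_mem _ hp)]

theorem pv_foldl_insert_items_nil {ν : Type} (l : List (String × ν))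
    (hnd : (l.map Prod.fst).Nodup) :
    (l.foldl (fun acc p => acc.insert p.1 p.2) PySem.Dict.empty).items = l := by
  simpa using pv_foldl_insert_items l PySem.Dict.empty hnd (by intro p _; simp)

-- the composite key: '0'/'1' prefix orders dirs before files, then alphabetically
theorem pv_key_lt_of_flag (s t : String) : ("0" ++ s) < ("1" ++ t) := by
  rw [String.lt_iff_toList_lt]
  simp only [String.toList_append]
  exact List.lex_eq_true_iff_lt.mp rfl

theorem pv_key_lt_same_flag (c : String) (s t : String) (h : s < t) (hc : c.toList.length = 1) :
    (c ++ s) < (c ++ t) := by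
  rw [String.lt_iff_toList_lt]
  simp only [String.toList_append]
  obtain ⟨a, ha⟩ : ∃ a, c.toList = [a] := List.length_eq_one_iff.mp hc
  rw [ha]
  simp only [List.cons_append, List.nil_append]
  exact List.cons_lt_cons_self.mpr (String.lt_iff_toList_lt.mp h)

-- pairwise ≤ on keys plus distinct keys gives pairwise <
theorem pv_pairwise_lt_of_sorted {ν : Type} (l : List (String × ν))
    (hnd : (l.map Prod.fst).Nodup) :
    (PySem.List.sorted l (fun item => item.1) false).Pairwise (fun a b => a.1 < b.1) := by
  have hle := PySem.List.sorted_pairwise l (fun item => item.1)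
  have hperm : (PySem.List.sorted l (fun item => item.1) false).Perm l :=
    PySem.List.sorted_perm l _ _
  have hnd' : ((PySem.List.sorted l (fun item => item.1) false).map Prod.fst).Nodup :=
    ((hperm.map Prod.fst).nodup_iff).mpr hnd
  have hne : (PySem.List.sorted l (fun item => item.1) false).Pairwise
      (fun a b => a.1 ≠ b.1) := by
    rw [← List.pairwise_map (f := Prod.fst)]
    exact hnd'
  exact (hle.and hne).imp (fun h => lt_of_le_of_ne h.1 h.2)

theorem pv_nodup_filter {ν : Type} (l : List (String × ν)) (q : String × ν → Bool)
    (hnd : (l.map Prod.fst).Nodup) : ((l.filter q).map Prod.fst).Nodup :=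
  hnd.sublist ((List.filter_sublist (p := q) (l := l)).map Prod.fst)

theorem pv_nodup_sorted_filter {ν : Type} (l : List (String × ν)) (q : String × ν → Bool)
    (hnd : (l.map Prod.fst).Nodup) :
    ((PySem.List.sorted (l.filter q) (fun item => item.1) false).map Prod.fst).Nodup :=
  (((PySem.List.sorted_perm (l.filter q) (fun item => item.1) false).map Prod.fst).nodup_iff).mpr
    (pv_nodup_filter l q hnd)

-- A's result: sorted dirs followed by sorted files, as plain lists
theorem pv_A_eq (root_name : String) (l : List (String × List Int))
    (hnd : (l.map Prod.fst).Nodup) :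
    alphabet_sort root_name l =
      PySem.List.sorted (l.filter pvP) (fun item => item.1) false ++
      PySem.List.sorted (l.filter (fun kv => !pvP kv)) (fun item => item.1) false := by
  unfold alphabet_sort
  -- the partition loop
  have hloop : l.foldl
      (fun (st : PySem.Dict String (List Int) × PySem.Dict String (List Int)) kv =>
        if PySem.Str.pyGet? kv.1 (-1) == some '/' then
          (st.1.insert kv.1 ((PySem.Dict.mk l).getD kv.1 []), st.2)
        else
          (st.1, st.2.insert kv.1 ((PySem.Dict.mk l).getD kv.1 [])))
      (PySem.Dict.empty, PySem.Dict.empty) =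
      ((l.filter pvP).foldl (fun acc p => acc.insert p.1 p.2) PySem.Dict.empty,
       (l.filter (fun kv => !pvP kv)).foldl (fun acc p => acc.insert p.1 p.2) PySem.Dict.empty) := by
    rw [PySem.List.foldl_congr_mem l _
      (fun (st : PySem.Dict String (List Int) × PySem.Dict String (List Int)) kv =>
        ((fun d kv => if pvP kv then PySem.Dict.insert d kv.1 kv.2 else d) st.1 kv,
         (fun d kv => if !pvP kv then PySem.Dict.insert d kv.1 kv.2 else d) st.2 kv)) _ ?_]
    · beta_reduce
      rw [PySem.List.foldl_prod_mk
        (f := fun d kv => if pvP kv then PySem.Dict.insert d kv.1 kv.2 else d)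
        (g := fun d kv => if !pvP kv then PySem.Dict.insert d kv.1 kv.2 else d)]
      rw [PySem.List.foldl_if_eq_foldl_filter, PySem.List.foldl_if_eq_foldl_filter]
    · intro acc x hx
      have hget : (PySem.Dict.mk l).getD x.1 [] = x.2 := by
        refine PySem.Dict.getD_of_mem_items (PySem.Dict.mk l) ?_ ?_ []
        · simpa using hx
        · simpa [PySem.Dict.keys] using hnd
      rw [hget]
      cases h : (PySem.Str.pyGet? x.1 (-1) == some '/') <;>
      · simp only [PySem.Str.pyGet?, PySem.Chars.pyGet?, beq_iff_eq, beq_eq_false_iff_ne,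
          ne_eq] at h
        simp [pvP, PySem.Str.pyGet?, PySem.Chars.pyGet?, h]
  rw [hloop]
  -- both partition dicts list exactly the filtered pairs
  simp only [PySem.Dict.ofList, PySem.Dict.update]
  rw [pv_foldl_insert_items_nil _ (pv_nodup_filter l pvP hnd),
      pv_foldl_insert_items_nil _ (pv_nodup_filter l (fun kv => !pvP kv) hnd)]
  -- sorting keeps the pairs; merging appends because the key sets are disjoint
  rw [pv_foldl_insert_items_nil _ (pv_nodup_sorted_filter l (fun kv => !pvP kv) hnd)]
  rw [pv_foldl_insert_items _ _ (pv_nodup_sorted_filter l (fun kv => !pvP kv) hnd) ?_]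
  · rw [pv_foldl_insert_items_nil _ (pv_nodup_sorted_filter l pvP hnd)]
  · intro pr hpr
    have hprf : pvP pr = false := by
      have := (List.mem_filter.mp ((PySem.List.mem_sorted _ _ _ _).mp hpr)).2
      simpa using this
    rw [PySem.Dict.contains]
    rw [pv_foldl_insert_items_nil _ (pv_nodup_sorted_filter l pvP hnd)]
    rw [List.any_eq_false]
    intro q hq
    have hqt : pvP q = true :=
      (List.mem_filter.mp ((PySem.List.mem_sorted _ _ _ _).mp hq)).2
    simp only [beq_iff_eq]
    intro h
    rw [pvP_eq_of_fst q pr h] at hqt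
    rw [hprf] at hqt
    exact Bool.false_ne_true hqt

-- B's result: one sort by the composite key gives the same concatenation
theorem pv_B_eq (root_name : String) (l : List (String × List Int))
    (hnd : (l.map Prod.fst).Nodup) :
    alphabet_sort_alt root_name l =
      PySem.List.sorted (l.filter pvP) (fun item => item.1) false ++
      PySem.List.sorted (l.filter (fun kv => !pvP kv)) (fun item => item.1) false := by
  unfold alphabet_sort_alt
  have hkey : (fun (item : String × List Int) =>
      (if PySem.Str.pyGet? item.1 (-1) == some '/' then "0" else "1") ++ item.1) = pvBigkey := by
    funext item; rfl
  rw [hkey]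
  set S1 := PySem.List.sorted (l.filter pvP) (fun item => item.1) false with hS1
  set S2 := PySem.List.sorted (l.filter (fun kv => !pvP kv)) (fun item => item.1) false with hS2
  have hsort : PySem.List.sorted l pvBigkey false = S1 ++ S2 := by
    apply PySem.List.sorted_eq_of_perm_of_pairwise_lt
    · exact (List.Perm.append (PySem.List.sorted_perm _ _ _)
        (PySem.List.sorted_perm _ _ _)).trans (List.filter_append_perm pvP l)
    · have hbig1 : ∀ a ∈ S1, pvBigkey a = "0" ++ a.1 := by
        intro a ha
        have h1 : pvP a = true := (List.mem_filter.mp ((PySem.List.mem_sorted _ _ _ _).mp ha)).2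
        simp only [pvP, beq_iff_eq, PySem.Str.pyGet?, PySem.Chars.pyGet?] at h1
        simp [pvBigkey, h1]
      have hbig2 : ∀ a ∈ S2, pvBigkey a = "1" ++ a.1 := by
        intro a ha
        have h1 : pvP a = false := by
          have := (List.mem_filter.mp ((PySem.List.mem_sorted _ _ _ _).mp ha)).2
          simpa using this
        simp only [pvP, beq_eq_false_iff_ne, ne_eq, PySem.Str.pyGet?, PySem.Chars.pyGet?] at h1
        simp [pvBigkey, h1]
      rw [List.pairwise_append]
      refine ⟨?_, ?_, ?_⟩
      · exact ((pv_pairwise_lt_of_sorted _ (pv_nodup_filter l pvP hnd)).imp_of_mem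
          (fun {a b} ha hb h => by
            rw [hbig1 a ha, hbig1 b hb]
            exact pv_key_lt_same_flag "0" _ _ h (by decide)))
      · exact ((pv_pairwise_lt_of_sorted _ (pv_nodup_filter l (fun kv => !pvP kv) hnd)).imp_of_mem
          (fun {a b} ha hb h => by
            rw [hbig2 a ha, hbig2 b hb]
            exact pv_key_lt_same_flag "1" _ _ h (by decide)))
      · intro a ha b hb
        rw [hbig1 a ha, hbig2 b hb]
        exact pv_key_lt_of_flag a.1 b.1
  rw [hsort]
  simp only [PySem.Dict.ofList, PySem.Dict.update]
  rw [pv_foldl_insert_items_nil]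
  have : ((S1 ++ S2).map Prod.fst).Nodup := by
    have hperm : (S1 ++ S2).Perm l := (List.Perm.append (PySem.List.sorted_perm _ _ _)
        (PySem.List.sorted_perm _ _ _)).trans (List.filter_append_perm pvP l)
    exact ((hperm.map Prod.fst).nodup_iff).mpr hnd
  exact this

-- ===== VERDICT (by name: the statement is the Claim_ definition above) =====
theorem alphabet_sort_spec : Claim_equal_alphabet_sort := by
  intro root_name counts_dict _hdom hpre
  obtain ⟨_hne, hnd⟩ := hpre
  unfold Spec_alphabet_sort
  rw [pv_A_eq root_name counts_dict hnd, pv_B_eq root_name counts_dict hnd]
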